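-- pv_equiv track=rewrite | github.com/soodal5629/codingTestProblemSolve | 백준25601(자바의 형변환).py | find
-- ===== SOURCE A (Python) =====
-- from collections import deque, defaultdict
--
-- def find(dict, a, b):
--   res = 0
--   d = deque()
--   d.append(a)
--   v = defaultdict(bool)
--   v[a] = True
--   while d:
--     now = d.popleft()
--     for i in dict[now]:
--       if not v[i]:
--         d.append(i)
--         v[i] = True
--   if v[a] and v[b]: return True
--   else: return False
-- ===== SOURCE B (Python) =====
-- # B: round-based reachability closure (fixed-point iteration) instead of A's BFS worklist;
-- # returns exactly A's value wherever both are defined. 'dict' shadows the builtin, as in A.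
-- def find(dict, a, b):
--     visited = {a}
--     for _ in range(len(dict)):
--         for node in list(visited):
--             for i in dict[node]:
--                 visited.add(i)
--     return a in visited and b in visited
-- ===== Notes on version B (the rewrite author's own statement) =====
-- stated objective: alternative
-- what changed: Replaces A's FIFO-queue BFS with a round-based fixed-point closure: len(dict) rounds, each adding all neighbours of the current visited set, then the same membership test.
import Mathlib
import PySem

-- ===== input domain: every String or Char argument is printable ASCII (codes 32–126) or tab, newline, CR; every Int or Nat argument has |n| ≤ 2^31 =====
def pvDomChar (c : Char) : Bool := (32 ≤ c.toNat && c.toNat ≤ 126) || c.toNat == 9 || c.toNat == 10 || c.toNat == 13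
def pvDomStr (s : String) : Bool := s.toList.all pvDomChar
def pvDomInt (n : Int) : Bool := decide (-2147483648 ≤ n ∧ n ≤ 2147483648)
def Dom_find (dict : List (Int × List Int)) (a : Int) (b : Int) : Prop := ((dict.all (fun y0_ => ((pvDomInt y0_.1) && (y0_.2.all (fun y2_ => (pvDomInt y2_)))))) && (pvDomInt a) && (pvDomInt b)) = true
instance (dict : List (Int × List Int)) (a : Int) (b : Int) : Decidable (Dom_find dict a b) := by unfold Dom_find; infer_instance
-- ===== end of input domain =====

-- B replaces A's FIFO-queue BFS with a round-based fixed-point closure (alternative algorithm,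
-- not claimed faster); both return the same Bool on every input admitted by Pre_find.

-- ===== PORT A =====
-- One step of A's inner 'for i in dict[now]': append fresh node to the queue and mark it visited.
-- A's defaultdict(bool) 'v' is modelled as the PySem.Set of keys holding True (reading v[b] on the
-- defaultdict inserts b with value False in Python, which does not affect the returned value).
def pvAdjStep (s : List Int × PySem.Set Int) (i : Int) : List Int × PySem.Set Int :=
  if s.2.contains i then s else (s.1 ++ [i], PySem.Set.add s.2 i)

def pvMeasure (g : PySem.Dict Int (List Int)) (d : List Int) (v : PySem.Set Int) : Nat :=
  2 * ((g.values.flatten.toFinset \ v.toFinset).card) + d.length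

-- needed by findLoop's termination proof, hence stated before it
theorem pvAdjStep_measure (g : PySem.Dict Int (List Int)) (adj : List Int)
    (hadj : ∀ i ∈ adj, i ∈ g.values.flatten) :
    ∀ (d : List Int) (v : PySem.Set Int),
      pvMeasure g (adj.foldl pvAdjStep (d, v)).1 (adj.foldl pvAdjStep (d, v)).2 ≤ pvMeasure g d v := by
  induction adj with
  | nil => intro d v; simp
  | cons i rest ih =>
    intro d v
    have hi : i ∈ g.values.flatten := hadj i (by simp)
    have hrest : ∀ j ∈ rest, j ∈ g.values.flatten := fun j hj => hadj j (by simp [hj])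
    simp only [List.foldl_cons]
    by_cases hiv : i ∈ v
    · have hstep : pvAdjStep (d, v) i = (d, v) := by
        unfold pvAdjStep; simp [PySem.Set.contains, List.contains_iff_mem, hiv]
      rw [hstep]; exact ih hrest d v
    · have hstep : pvAdjStep (d, v) i = (d ++ [i], v ++ [i]) := by
        unfold pvAdjStep PySem.Set.add; simp [PySem.Set.contains, List.contains_iff_mem, hiv]
      rw [hstep]
      refine le_trans (ih hrest _ _) ?_
      have hfs : (v ++ [i]).toFinset = insert i v.toFinset := by
        simp [List.toFinset_append, Finset.union_comm]
      have hcard : (g.values.flatten.toFinset \ (v ++ [i]).toFinset).card + 1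
          = (g.values.flatten.toFinset \ v.toFinset).card := by
        rw [hfs, Finset.sdiff_insert, Finset.card_erase_add_one]
        simp [hiv, hi]
      unfold pvMeasure
      simp only [List.length_append, List.length_cons, List.length_nil]
      omega

-- transliteration of A's while-loop over the deque 'd' and visited map 'v'
def findLoop (g : PySem.Dict Int (List Int)) (d : List Int) (v : PySem.Set Int) :
    Option (PySem.Set Int) :=
  match d with
  | [] => some v
  | now :: rest =>
    match h : g.get? now with
    | none => none        -- Python raises KeyError on dict[now] (excluded by Pre_find)
    | some adj => findLoop g (adj.foldl pvAdjStep (rest, v)).1 (adj.foldl pvAdjStep (rest, v)).2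
termination_by pvMeasure g d v
decreasing_by
  have hadj : ∀ i ∈ adj, i ∈ g.values.flatten := by
    intro i hi
    have hm : (now, adj) ∈ g.items := PySem.Dict.mem_items_of_get?_eq_some g h
    have hv : adj ∈ g.values := by
      simp only [PySem.Dict.values]
      exact List.mem_map.mpr ⟨(now, adj), hm, rfl⟩
    exact List.mem_flatten.mpr ⟨adj, hv, hi⟩
  have h1 := pvAdjStep_measure g adj hadj rest v
  have h2 : pvMeasure g (now :: rest) v = pvMeasure g rest v + 1 := by
    unfold pvMeasure; simp only [List.length_cons]; omega
  omega

def find (dict : List (Int × List Int)) (a : Int) (b : Int) : Bool :=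
  match findLoop (PySem.Dict.ofList dict) [a] (PySem.Set.add PySem.Set.empty a) with
  | none => false       -- Python raises KeyError (excluded by Pre_find)
  | some v => v.contains a && v.contains b

-- ===== PORT B =====
-- one round: 'for node in list(visited): for i in dict[node]: visited.add(i)'
def pvRound (g : PySem.Dict Int (List Int)) (v : PySem.Set Int) : Option (PySem.Set Int) :=
  v.foldlM (fun acc node => (g.get? node).map (fun adj => adj.foldl PySem.Set.add acc)) v

def find_alt (dict : List (Int × List Int)) (a : Int) (b : Int) : Bool :=
  let g := PySem.Dict.ofList dict
  match (List.range dict.length).foldlM (fun v _ => pvRound g v)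
      (PySem.Set.add PySem.Set.empty a) with
  | none => false       -- Python raises KeyError (excluded by Pre_find)
  | some v => v.contains a && v.contains b

-- ===== PRECONDITION & SPEC =====
-- one expansion step of the neighbourhood of s in the graph (missing keys contribute nothing)
def pvPreExpand (dict : List (Int × List Int)) (s : List Int) : List Int :=
  PySem.Set.update s (s.flatMap (fun x => (PySem.Dict.ofList dict).getD x []))

-- Pre_find holds exactly when Python's dict[...] never raises KeyError: the start node and every
-- node reachable from it (the dict.length-step neighbourhood closure of a) has an entry.
def Pre_find (dict : List (Int × List Int)) (a : Int) (b : Int) : Prop :=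
  a ∈ dict.map Prod.fst ∧
    ∀ x ∈ (pvPreExpand dict)^[dict.length] [a], x ∈ dict.map Prod.fst
instance (dict : List (Int × List Int)) (a : Int) (b : Int) : Decidable (Pre_find dict a b) := by
  unfold Pre_find; infer_instance

def pvWitness_find : (List (Int × List Int)) × Int × Int := ([(1, [2]), (2, [1]), (3, [])], 1, 3)

def Spec_find (dict : List (Int × List Int)) (a : Int) (b : Int) (out : Bool) : Prop := out = find_alt dict a b
instance (dict : List (Int × List Int)) (a : Int) (b : Int) (out : Bool) : Decidable (Spec_find dict a b out) := by unfold Spec_find; infer_instance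

-- ===== CLAIM (what is proved, stated in full; the proofs are below) =====
def Claim_equal_find : Prop := ∀ (dict : List (Int × List Int)) (a : Int) (b : Int), Dom_find dict a b → Pre_find dict a b → Spec_find dict a b (find dict a b)

-- ===== LEMMAS AND PROOFS =====

-- reachability in the graph g from a
inductive pvReach (g : PySem.Dict Int (List Int)) (a : Int) : Int → Prop
  | base : pvReach g a a
  | step {x i : Int} {adj : List Int} :
      pvReach g a x → g.get? x = some adj → i ∈ adj → pvReach g a i

theorem pv_mem_contains (s : PySem.Set Int) (x : Int) : s.contains x = true ↔ x ∈ s := by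
  simp [PySem.Set.contains, List.contains_iff_mem]

theorem pv_set_add_nodup (s : PySem.Set Int) (x : Int) (h : s.Nodup) : (s.add x).Nodup := by
  unfold PySem.Set.add; split
  · exact h
  · rename_i hc
    have hx : x ∉ s := fun hm => hc ((pv_mem_contains s x).mpr hm)
    exact h.append (List.nodup_singleton x)
      (by intro a ha hb; simp only [List.mem_singleton] at hb; exact hx (hb ▸ ha))

-- characterisation of A's inner fold: it appends one common fresh suffix e to queue and visited
theorem pvAdjStep_fold (adj : List Int) : ∀ (d : List Int) (v : PySem.Set Int),
    ∃ e : List Int,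
      (adj.foldl pvAdjStep (d, v)).1 = d ++ e ∧
      (adj.foldl pvAdjStep (d, v)).2 = v ++ e ∧
      (∀ x ∈ e, x ∈ adj) ∧
      (∀ i ∈ adj, i ∈ v ++ e) := by
  induction adj with
  | nil => intro d v; exact ⟨[], by simp⟩
  | cons i rest ih =>
    intro d v
    simp only [List.foldl_cons]
    by_cases hiv : i ∈ v
    · have hstep : pvAdjStep (d, v) i = (d, v) := by
        unfold pvAdjStep; simp [PySem.Set.contains, List.contains_iff_mem, hiv]
      rw [hstep]
      obtain ⟨e, h1, h2, h3, h4⟩ := ih d v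
      refine ⟨e, h1, h2, fun x hx => by simp [h3 x hx], fun j hj => ?_⟩
      rcases List.mem_cons.mp hj with h | h
      · subst h; exact List.mem_append_left _ hiv
      · exact h4 j h
    · have hstep : pvAdjStep (d, v) i = (d ++ [i], v ++ [i]) := by
        unfold pvAdjStep PySem.Set.add; simp [PySem.Set.contains, List.contains_iff_mem, hiv]
      rw [hstep]
      obtain ⟨e, h1, h2, h3, h4⟩ := ih (d ++ [i]) (v ++ [i])
      refine ⟨i :: e, ?_, ?_, ?_, ?_⟩
      · simpa [List.append_assoc] using h1
      · simpa [List.append_assoc] using h2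
      · intro x hx
        rcases List.mem_cons.mp hx with h | h
        · simp [h]
        · simp [h3 x h]
      · intro j hj
        rcases List.mem_cons.mp hj with h | h
        · subst h; simp
        · have := h4 j h; simpa [List.append_assoc] using this

-- main BFS lemma: when every reachable node has an entry, findLoop returns a superset of v
-- that is sound for every
-- edge-closed predicate R and is itself closed under edges
theorem findLoop_main (g : PySem.Dict Int (List Int)) (a : Int)
    (hg : ∀ x, pvReach g a x → (g.get? x).isSome) :
    ∀ (d : List Int) (v : PySem.Set Int),
      (∀ x ∈ d, x ∈ v) →
      (∀ x ∈ v, pvReach g a x) →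
      (∀ x ∈ v, x ∉ d → ∀ adj, g.get? x = some adj → ∀ i ∈ adj, i ∈ v) →
      ∃ vf, findLoop g d v = some vf ∧
        (∀ x ∈ v, x ∈ vf) ∧
        (∀ R : Int → Prop, (∀ x ∈ v, R x) →
          (∀ x adj i, R x → g.get? x = some adj → i ∈ adj → R i) → ∀ x ∈ vf, R x) ∧
        (∀ x ∈ vf, ∀ adj, g.get? x = some adj → ∀ i ∈ adj, i ∈ vf) := by
  intro d v
  induction d, v using findLoop.induct g with
  | case1 v =>
    intro _ _ h3
    exact ⟨v, by rw [findLoop], fun x hx => hx,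
      fun R hR _ x hx => hR x hx,
      fun x hx adj hadj i hi => h3 x hx (by simp) adj hadj i hi⟩
  | case2 v now rest hnone =>
    intro h1 h2 _
    have := hg now (h2 now (h1 now (by simp)))
    rw [hnone] at this
    simp at this
  | case3 v now rest adj hnow ih =>
    intro h1 h2 h3
    obtain ⟨e, he1, he2, he3, he4⟩ := pvAdjStep_fold adj rest v
    have hmemv' : ∀ x, x ∈ (adj.foldl pvAdjStep (rest, v)).2 ↔ x ∈ v ∨ x ∈ e := by
      intro x; rw [he2]; simp
    -- hypotheses for the recursive call
    have H1 : ∀ x ∈ (adj.foldl pvAdjStep (rest, v)).1, x ∈ (adj.foldl pvAdjStep (rest, v)).2 := by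
      intro x hx
      rw [he1] at hx
      rcases List.mem_append.mp hx with h | h
      · exact (hmemv' x).mpr (Or.inl (h1 x (by simp [h])))
      · exact (hmemv' x).mpr (Or.inr h)
    have H2 : ∀ x ∈ (adj.foldl pvAdjStep (rest, v)).2, pvReach g a x := by
      intro x hx
      rcases (hmemv' x).mp hx with h | h
      · exact h2 x h
      · exact pvReach.step (h2 now (h1 now (by simp))) hnow (he3 x h)
    have H3 : ∀ x ∈ (adj.foldl pvAdjStep (rest, v)).2, x ∉ (adj.foldl pvAdjStep (rest, v)).1 →
        ∀ adj2, g.get? x = some adj2 → ∀ i ∈ adj2, i ∈ (adj.foldl pvAdjStep (rest, v)).2 := by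
      intro x hx hnd adj2 hadj2 i hi
      rcases (hmemv' x).mp hx with h | h
      · by_cases hxn : x = now
        · subst hxn
          have : adj2 = adj := by rw [hnow] at hadj2; exact (Option.some_inj.mp hadj2).symm
          subst this
          exact (hmemv' i).mpr (by simpa using he4 i hi)
        · have hxr : x ∉ rest := fun hr => hnd (by rw [he1]; exact List.mem_append_left _ hr)
          have : x ∉ now :: rest := by simp [hxn, hxr]
          exact (hmemv' i).mpr (Or.inl (h3 x h this adj2 hadj2 i hi))
      · exact absurd (by rw [he1]; exact List.mem_append_right _ h) hnd
    obtain ⟨vf, hvf, hext, hsound, hclosed⟩ := ih H1 H2 H3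
    have heq : findLoop g (now :: rest) v = some vf := by
      rw [findLoop, hnow]; exact hvf
    refine ⟨vf, heq, fun x hx => hext x ((hmemv' x).mpr (Or.inl hx)), ?_, hclosed⟩
    intro R hRv hRe x hx
    refine hsound R ?_ hRe x hx
    intro y hy
    rcases (hmemv' y).mp hy with h | h
    · exact hRv y h
    · exact hRe now adj y (hRv now (h1 now (by simp))) hnow (he3 y h)

-- the set A computes is exactly the reachable set
theorem bfs_char (g : PySem.Dict Int (List Int)) (a : Int)
    (hg : ∀ x, pvReach g a x → (g.get? x).isSome) :
    ∃ vf, findLoop g [a] [a] = some vf ∧ ∀ x, x ∈ vf ↔ pvReach g a x := by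
  obtain ⟨vf, hvf, hext, hsound, hclosed⟩ :=
    findLoop_main g a hg [a] [a] (by simp)
      (by intro x hx; simp only [List.mem_singleton] at hx; rw [hx]; exact pvReach.base) (by simp)
  refine ⟨vf, hvf, fun x => ⟨?_, ?_⟩⟩
  · exact fun hx => hsound (pvReach g a) (by simp; exact pvReach.base)
      (fun y adj i hy h1 h2 => pvReach.step hy h1 h2) x hx
  · intro hr
    induction hr with
    | base => exact hext a (by simp)
    | step hy h1 h2 ih => exact hclosed _ ih _ h1 _ h2

-- ===== B-side lemmas =====

def pvAdjD (g : PySem.Dict Int (List Int)) (node : Int) : List Int := (g.get? node).getD []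

-- the pure value of one round of B
def pvRoundP (g : PySem.Dict Int (List Int)) (snap : List Int) (acc : PySem.Set Int) :
    PySem.Set Int :=
  snap.foldl (fun acc node => (pvAdjD g node).foldl PySem.Set.add acc) acc

def pvIter (g : PySem.Dict Int (List Int)) (a : Int) : Nat → PySem.Set Int
  | 0 => [a]
  | n + 1 => pvRoundP g (pvIter g a n) (pvIter g a n)

theorem pv_foldl_add_exists (l : List Int) : ∀ acc : PySem.Set Int,
    ∃ e, l.foldl PySem.Set.add acc = acc ++ e ∧ (∀ x ∈ e, x ∈ l) ∧ (∀ x ∈ l, x ∈ acc ++ e) := by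
  induction l with
  | nil => intro acc; exact ⟨[], by simp⟩
  | cons i rest ih =>
    intro acc
    simp only [List.foldl_cons]
    by_cases hiv : i ∈ acc
    · have hstep : PySem.Set.add acc i = acc := by
        unfold PySem.Set.add; simp [PySem.Set.contains, List.contains_iff_mem, hiv]
      rw [hstep]
      obtain ⟨e, h1, h2, h3⟩ := ih acc
      refine ⟨e, h1, fun x hx => by simp [h2 x hx], fun x hx => ?_⟩
      rcases List.mem_cons.mp hx with h | h
      · subst h; exact List.mem_append_left _ hiv
      · exact h3 x h
    · have hstep : PySem.Set.add acc i = acc ++ [i] := by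
        unfold PySem.Set.add; simp [PySem.Set.contains, List.contains_iff_mem, hiv]
      rw [hstep]
      obtain ⟨e, h1, h2, h3⟩ := ih (acc ++ [i])
      refine ⟨i :: e, by simpa [List.append_assoc] using h1, ?_, ?_⟩
      · intro x hx
        rcases List.mem_cons.mp hx with h | h
        · simp [h]
        · simp [h2 x h]
      · intro x hx
        rcases List.mem_cons.mp hx with h | h
        · subst h; simp
        · have := h3 x h; simpa [List.append_assoc] using this

theorem pvRoundP_exists (g : PySem.Dict Int (List Int)) (snap : List Int) :
    ∀ acc : PySem.Set Int,
      ∃ e, pvRoundP g snap acc = acc ++ e ∧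
        (∀ x ∈ e, ∃ node ∈ snap, x ∈ pvAdjD g node) ∧
        (∀ node ∈ snap, ∀ i ∈ pvAdjD g node, i ∈ pvRoundP g snap acc) := by
  induction snap with
  | nil => intro acc; exact ⟨[], by simp [pvRoundP]⟩
  | cons n rest ih =>
    intro acc
    unfold pvRoundP
    simp only [List.foldl_cons]
    obtain ⟨e1, g1, g2, g3⟩ := pv_foldl_add_exists (pvAdjD g n) acc
    rw [g1]
    obtain ⟨e2, h1, h2, h3⟩ := ih (acc ++ e1)
    unfold pvRoundP at h1 h3
    refine ⟨e1 ++ e2, by simpa [List.append_assoc] using h1, ?_, ?_⟩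
    · intro x hx
      rcases List.mem_append.mp hx with h | h
      · exact ⟨n, by simp, g2 x h⟩
      · obtain ⟨node, hn, hxn⟩ := h2 x h
        exact ⟨node, by simp [hn], hxn⟩
    · intro node hn i hi
      rcases List.mem_cons.mp hn with h | h
      · subst h
        have : i ∈ acc ++ e1 := g3 i hi
        rw [h1]
        simpa [List.append_assoc] using List.mem_append_left e2 this
      · exact h3 node h i hi

theorem pvRoundP_mono (g : PySem.Dict Int (List Int)) (snap : List Int) (acc : PySem.Set Int)
    (x : Int) (hx : x ∈ acc) : x ∈ pvRoundP g snap acc := by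
  obtain ⟨e, h1, _, _⟩ := pvRoundP_exists g snap acc
  rw [h1]; exact List.mem_append_left _ hx

theorem pvRoundP_mem (g : PySem.Dict Int (List Int)) (snap : List Int) (acc : PySem.Set Int)
    (x : Int) (hx : x ∈ pvRoundP g snap acc) :
    x ∈ acc ∨ ∃ node ∈ snap, x ∈ pvAdjD g node := by
  obtain ⟨e, h1, h2, _⟩ := pvRoundP_exists g snap acc
  rw [h1] at hx
  rcases List.mem_append.mp hx with h | h
  · exact Or.inl h
  · exact Or.inr (h2 x h)

theorem pv_foldl_add_nodup (l : List Int) : ∀ acc : PySem.Set Int, acc.Nodup →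
    (l.foldl PySem.Set.add acc).Nodup := by
  induction l with
  | nil => intro acc h; simpa
  | cons i rest ih => intro acc h; exact ih _ (pv_set_add_nodup acc i h)

theorem pvRoundP_nodup (g : PySem.Dict Int (List Int)) (snap : List Int) :
    ∀ acc : PySem.Set Int, acc.Nodup → (pvRoundP g snap acc).Nodup := by
  induction snap with
  | nil => intro acc h; simpa [pvRoundP]
  | cons n rest ih =>
    intro acc h
    unfold pvRoundP
    simp only [List.foldl_cons]
    exact ih _ (pv_foldl_add_nodup _ _ h)

-- invariant: every iterate consists of nodes with an entry, reachable from a, contains a, nodup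
theorem pvIter_inv (g : PySem.Dict Int (List Int)) (a : Int)
    (hg : ∀ x, pvReach g a x → (g.get? x).isSome) (n : Nat) :
    (∀ x ∈ pvIter g a n, (g.get? x).isSome) ∧ (∀ x ∈ pvIter g a n, pvReach g a x) ∧
      a ∈ pvIter g a n ∧ (pvIter g a n).Nodup := by
  induction n with
  | zero =>
    refine ⟨?_, by simpa [pvIter] using pvReach.base, by simp [pvIter], by simp [pvIter]⟩
    intro x hx
    simp only [pvIter, List.mem_singleton] at hx
    rw [hx]; exact hg a pvReach.base
  | succ n ih =>
    obtain ⟨i1, i2, i3, i4⟩ := ih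
    have hmem : ∀ x ∈ pvIter g a (n+1),
        x ∈ pvIter g a n ∨ ∃ node ∈ pvIter g a n, x ∈ pvAdjD g node := by
      intro x hx; exact pvRoundP_mem g _ _ x hx
    have hnb : ∀ node ∈ pvIter g a n, ∀ x ∈ pvAdjD g node,
        (g.get? x).isSome ∧ pvReach g a x := by
      intro node hn x hx
      obtain ⟨adj, hadj⟩ := Option.isSome_iff_exists.mp (i1 node hn)
      have : pvAdjD g node = adj := by simp [pvAdjD, hadj]
      rw [this] at hx
      have hr : pvReach g a x := pvReach.step (i2 node hn) hadj hx
      exact ⟨hg x hr, hr⟩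
    refine ⟨?_, ?_, pvRoundP_mono g _ _ a i3, pvRoundP_nodup g _ _ i4⟩
    · intro x hx
      rcases hmem x hx with h | ⟨node, hn, hxn⟩
      · exact i1 x h
      · exact (hnb node hn x hxn).1
    · intro x hx
      rcases hmem x hx with h | ⟨node, hn, hxn⟩
      · exact i2 x h
      · exact (hnb node hn x hxn).2

-- a fixed round stays fixed forever
theorem pvIter_stable (g : PySem.Dict Int (List Int)) (a : Int) (n : Nat)
    (hfix : pvIter g a (n + 1) = pvIter g a n) :
    ∀ m, n ≤ m → pvIter g a m = pvIter g a n := by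
  intro m hm
  induction m with
  | zero => rw [Nat.le_zero.mp hm]
  | succ m ih =>
    by_cases h : n = m + 1
    · rw [h]
    · have hnm : n ≤ m := by omega
      have := ih hnm
      show pvRoundP g (pvIter g a m) (pvIter g a m) = pvIter g a n
      rw [this]
      exact hfix

-- strict growth before the fixed point
theorem pvIter_grow (g : PySem.Dict Int (List Int)) (a : Int) (n : Nat)
    (hne : pvIter g a (n + 1) ≠ pvIter g a n) :
    (pvIter g a n).length < (pvIter g a (n + 1)).length := by
  obtain ⟨e, h1, _, _⟩ := pvRoundP_exists g (pvIter g a n) (pvIter g a n)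
  have h1' : pvIter g a (n + 1) = pvIter g a n ++ e := h1
  cases e with
  | nil => exact absurd (by simpa using h1') hne
  | cons y ys => rw [h1']; simp

-- length of a nodup list is at most that of any list containing it
theorem pv_nodup_len {l l' : List Int} (h : l.Nodup) (hs : ∀ x ∈ l, x ∈ l') :
    l.length ≤ l'.length := by
  calc l.length = l.toFinset.card := (List.toFinset_card_of_nodup h).symm
    _ ≤ l'.toFinset.card := Finset.card_le_card
        (fun x hx => List.mem_toFinset.mpr (hs x (List.mem_toFinset.mp hx)))
    _ ≤ l'.length := l'.toFinset_card_le

-- the iterates reach their fixed point within K rounds and then equal the reachable set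
theorem pv_iter_final (g : PySem.Dict Int (List Int)) (a : Int)
    (hg : ∀ x, pvReach g a x → (g.get? x).isSome) (K : Nat)
    (hK : ∀ n, (pvIter g a n).length ≤ K) :
    ∀ x, x ∈ pvIter g a K ↔ pvReach g a x := by
  have hfix : ∃ n, n < K ∧ pvIter g a (n + 1) = pvIter g a n := by
    by_contra hcon
    push_neg at hcon
    have haux : ∀ m, m ≤ K → m + 1 ≤ (pvIter g a m).length := by
      intro m
      induction m with
      | zero => intro _; simp [pvIter]
      | succ m ih =>
        intro hm
        have h1 := ih (by omega)
        have h2 := pvIter_grow g a m (hcon m (by omega))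
        omega
    have := haux K (le_refl K)
    have := hK K
    omega
  obtain ⟨n, hn, hfixn⟩ := hfix
  have hKn : pvIter g a K = pvIter g a n := pvIter_stable g a n hfixn K (by omega)
  obtain ⟨i1, i2, i3, i4⟩ := pvIter_inv g a hg n
  intro x
  constructor
  · intro hx
    rw [hKn] at hx
    exact i2 x hx
  · intro hr
    rw [hKn]
    induction hr with
    | base => exact i3
    | step hy hadj hi ih =>
      rename_i y i adj
      obtain ⟨e, _, _, h3⟩ := pvRoundP_exists g (pvIter g a n) (pvIter g a n)
      have hD : pvAdjD g y = adj := by simp [pvAdjD, hadj]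
      have h5 : i ∈ pvIter g a (n + 1) := h3 y ih i (by rw [hD]; exact hi)
      rwa [hfixn] at h5

-- Option-monad fold with an everywhere-successful body computes the pure fold
theorem pv_foldlM_option {α σ : Type} (l : List α) : ∀ (f : σ → α → Option σ) (fp : σ → α → σ)
    (s : σ), (∀ s' x, x ∈ l → f s' x = some (fp s' x)) →
    l.foldlM f s = some (l.foldl fp s) := by
  induction l with
  | nil => intro f fp s _; rfl
  | cons i rest ih =>
    intro f fp s hf
    rw [List.foldlM_cons, hf s i (by simp)]
    simp only [Option.bind_eq_bind, Option.bind_some]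
    exact ih f fp (fp s i) (fun s' x hx => hf s' x (by simp [hx]))

theorem pvRound_eq (g : PySem.Dict Int (List Int)) (v : PySem.Set Int)
    (h : ∀ x ∈ v, (g.get? x).isSome) :
    pvRound g v = some (pvRoundP g v v) := by
  unfold pvRound pvRoundP
  exact pv_foldlM_option v _ _ v (by
    intro s' x hx
    obtain ⟨adj, hadj⟩ := Option.isSome_iff_exists.mp (h x hx)
    simp [hadj, pvAdjD])

theorem pv_fold_iter (g : PySem.Dict Int (List Int)) (a : Int)
    (hg : ∀ x, pvReach g a x → (g.get? x).isSome) :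
    ∀ n, (List.range n).foldlM (fun v _ => pvRound g v) [a] = some (pvIter g a n) := by
  intro n
  induction n with
  | zero => rfl
  | succ n ih =>
    rw [List.range_succ, List.foldlM_append, ih]
    have h1 := (pvIter_inv g a hg n).1
    simp [pvRound_eq g _ h1, pvIter]

-- ===== bridging Pre_find to the graph-side hypotheses =====

theorem pv_keys_ofList (dict : List (Int × List Int)) :
    (PySem.Dict.ofList dict).keys = PySem.Set.ofList (dict.map Prod.fst) := by
  have h := PySem.Dict.keys_foldl_insert_key (ν := List Int) dict Prod.fst
    (fun _ p => p.2) PySem.Dict.empty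
  simpa [PySem.Dict.ofList, PySem.Dict.update, PySem.Dict.keys_empty,
    PySem.Set.update_nil_left] using h

theorem pv_isSome_iff (dict : List (Int × List Int)) (x : Int) :
    ((PySem.Dict.ofList dict).get? x).isSome ↔ x ∈ dict.map Prod.fst := by
  constructor
  · intro h
    by_contra hmem
    have hn := (PySem.Dict.get?_eq_none_iff_not_mem_keys (PySem.Dict.ofList dict) x).mpr
      (by rw [pv_keys_ofList]; simpa [PySem.Set.mem_ofList] using hmem)
    rw [hn] at h; simp at h
  · intro h
    rcases ho : (PySem.Dict.ofList dict).get? x with _ | v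
    · have hn := (PySem.Dict.get?_eq_none_iff_not_mem_keys _ x).mp ho
      rw [pv_keys_ofList] at hn
      exact absurd ((PySem.Set.mem_ofList _ x).mpr h) hn
    · simp

-- ===== Pre_find-side lemmas: the iterated neighbourhood closure contains every reachable node =====

theorem pvPreExpand_exists (dict : List (Int × List Int)) (s : List Int) :
    ∃ e, pvPreExpand dict s = s ++ e ∧
      (∀ x ∈ e, ∃ node ∈ s, x ∈ pvAdjD (PySem.Dict.ofList dict) node) ∧
      (∀ node ∈ s, ∀ i ∈ pvAdjD (PySem.Dict.ofList dict) node, i ∈ pvPreExpand dict s) := by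
  have hD : ∀ node, (PySem.Dict.ofList dict).getD node [] = pvAdjD (PySem.Dict.ofList dict) node :=
    fun node => PySem.Dict.getD_eq_get?_getD _ node []
  obtain ⟨e, h1, h2, h3⟩ :=
    pv_foldl_add_exists (s.flatMap (fun x => (PySem.Dict.ofList dict).getD x [])) s
  refine ⟨e, h1, ?_, ?_⟩
  · intro x hx
    obtain ⟨node, hn, hxn⟩ := List.mem_flatMap.mp (h2 x hx)
    exact ⟨node, hn, by rwa [← hD]⟩
  · intro node hn i hi
    have : i ∈ s.flatMap (fun x => (PySem.Dict.ofList dict).getD x []) :=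
      List.mem_flatMap.mpr ⟨node, hn, by rwa [hD]⟩
    have := h3 i this
    show i ∈ PySem.Set.update s (s.flatMap (fun x => (PySem.Dict.ofList dict).getD x []))
    rwa [show PySem.Set.update s (s.flatMap (fun x => (PySem.Dict.ofList dict).getD x []))
        = s ++ e from h1]

theorem pvPre_mono (dict : List (Int × List Int)) (a : Int) {m n : Nat} (hmn : m ≤ n) :
    ∀ x ∈ (pvPreExpand dict)^[m] [a], x ∈ (pvPreExpand dict)^[n] [a] := by
  induction n with
  | zero => rw [Nat.le_zero.mp hmn]; exact fun x hx => hx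
  | succ n ih =>
    by_cases h : m = n + 1
    · rw [h]; exact fun x hx => hx
    · intro x hx
      have hx' := ih (by omega) x hx
      rw [Function.iterate_succ_apply']
      obtain ⟨e, h1, _, _⟩ := pvPreExpand_exists dict ((pvPreExpand dict)^[n] [a])
      rw [h1]
      exact List.mem_append_left _ hx'

theorem pvPre_nodup (dict : List (Int × List Int)) (a : Int) (n : Nat) :
    ((pvPreExpand dict)^[n] [a]).Nodup := by
  induction n with
  | zero => simp
  | succ n ih =>
    rw [Function.iterate_succ_apply']
    exact pv_foldl_add_nodup _ _ ih

theorem pvPre_grow (dict : List (Int × List Int)) (a : Int) (n : Nat)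
    (hne : (pvPreExpand dict)^[n + 1] [a] ≠ (pvPreExpand dict)^[n] [a]) :
    ((pvPreExpand dict)^[n] [a]).length < ((pvPreExpand dict)^[n + 1] [a]).length := by
  obtain ⟨e, h1, _, _⟩ := pvPreExpand_exists dict ((pvPreExpand dict)^[n] [a])
  rw [Function.iterate_succ_apply'] at hne ⊢
  cases e with
  | nil => exact absurd (by simpa using h1) hne
  | cons y ys => rw [h1]; simp

theorem pvPre_stable (dict : List (Int × List Int)) (a : Int) (n : Nat)
    (hfix : (pvPreExpand dict)^[n + 1] [a] = (pvPreExpand dict)^[n] [a]) :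
    ∀ m, n ≤ m → (pvPreExpand dict)^[m] [a] = (pvPreExpand dict)^[n] [a] := by
  intro m hm
  induction m with
  | zero => rw [Nat.le_zero.mp hm]
  | succ m ih =>
    by_cases h : n = m + 1
    · rw [h]
    · have := ih (by omega)
      rw [Function.iterate_succ_apply', this, ← Function.iterate_succ_apply' (pvPreExpand dict) n [a], hfix]

-- under Pre_find every reachable node lies in the dict.length-step closure
theorem pvPre_reach (dict : List (Int × List Int)) (a b : Int) (hpre : Pre_find dict a b) :
    ∀ x, pvReach (PySem.Dict.ofList dict) a x → x ∈ (pvPreExpand dict)^[dict.length] [a] := by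
  have hkeylen : (PySem.Dict.ofList dict).keys.length ≤ dict.length := by
    rw [pv_keys_ofList]
    exact le_trans (PySem.Set.length_ofList_le _) (by simp)
  have hbound : ∀ n, n ≤ dict.length → ((pvPreExpand dict)^[n] [a]).length ≤ dict.length := by
    intro n hn
    have hsub : ∀ x ∈ (pvPreExpand dict)^[n] [a], x ∈ (PySem.Dict.ofList dict).keys := by
      intro x hx
      have := hpre.2 x (pvPre_mono dict a hn x hx)
      rw [pv_keys_ofList, PySem.Set.mem_ofList]
      exact this
    exact le_trans (pv_nodup_len (pvPre_nodup dict a n) hsub) hkeylen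
  have hfix : ∃ n, n < dict.length ∧
      (pvPreExpand dict)^[n + 1] [a] = (pvPreExpand dict)^[n] [a] := by
    by_contra hcon
    push_neg at hcon
    have haux : ∀ m, m ≤ dict.length → m + 1 ≤ ((pvPreExpand dict)^[m] [a]).length := by
      intro m
      induction m with
      | zero => intro _; simp
      | succ m ih =>
        intro hm
        have h1 := ih (by omega)
        have h2 := pvPre_grow dict a m (hcon m (by omega))
        omega
    have h1 := haux dict.length (le_refl _)
    have h2 := hbound dict.length (le_refl _)
    omega
  obtain ⟨n, hn, hfixn⟩ := hfix
  have hKn : (pvPreExpand dict)^[dict.length] [a] = (pvPreExpand dict)^[n] [a] :=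
    pvPre_stable dict a n hfixn dict.length (by omega)
  rw [hKn]
  intro x hr
  induction hr with
  | base => exact pvPre_mono dict a (Nat.zero_le n) a (by simp)
  | step hy hadj hi ih =>
    rename_i y i adj
    obtain ⟨e, _, _, h3⟩ := pvPreExpand_exists dict ((pvPreExpand dict)^[n] [a])
    have hD : pvAdjD (PySem.Dict.ofList dict) y = adj := by simp [pvAdjD, hadj]
    have h5 : i ∈ pvPreExpand dict ((pvPreExpand dict)^[n] [a]) :=
      h3 y ih i (by rw [hD]; exact hi)
    rw [← Function.iterate_succ_apply' (pvPreExpand dict) n [a]] at h5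
    rwa [hfixn] at h5

-- the two ports agree under Pre_find
theorem pv_main (dict : List (Int × List Int)) (a b : Int) (hpre : Pre_find dict a b) :
    find dict a b = find_alt dict a b := by
  have hg : ∀ x, pvReach (PySem.Dict.ofList dict) a x →
      ((PySem.Dict.ofList dict).get? x).isSome :=
    fun x hx => (pv_isSome_iff dict x).mpr (hpre.2 x (pvPre_reach dict a b hpre x hx))
  have hadd : PySem.Set.add PySem.Set.empty a = [a] := rfl
  obtain ⟨vf, hvf, hiffA⟩ := bfs_char (PySem.Dict.ofList dict) a hg
  have hK : ∀ n, (pvIter (PySem.Dict.ofList dict) a n).length ≤ dict.length := by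
    intro n
    obtain ⟨i1, _, _, i4⟩ := pvIter_inv _ a hg n
    have hsub : ∀ x ∈ pvIter (PySem.Dict.ofList dict) a n, x ∈ dict.map Prod.fst :=
      fun x hx => (pv_isSome_iff dict x).mp (i1 x hx)
    simpa using pv_nodup_len i4 hsub
  have hiffB := pv_iter_final _ a hg dict.length hK
  have hfold := pv_fold_iter _ a hg dict.length
  have hA : find dict a b = (vf.contains a && vf.contains b) := by
    unfold find; rw [hadd, hvf]
  have hB : find_alt dict a b =
      ((pvIter (PySem.Dict.ofList dict) a dict.length).contains a &&
       (pvIter (PySem.Dict.ofList dict) a dict.length).contains b) := by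
    unfold find_alt
    rw [hadd]
    show (match List.foldlM (fun v _ => pvRound (PySem.Dict.ofList dict) v) [a]
        (List.range dict.length) with
      | none => false
      | some v => v.contains a && v.contains b) = _
    rw [hfold]
  have hca : vf.contains a = true := (pv_mem_contains _ a).mpr ((hiffA a).mpr pvReach.base)
  have hcb : (pvIter (PySem.Dict.ofList dict) a dict.length).contains a = true :=
    (pv_mem_contains _ a).mpr ((hiffB a).mpr pvReach.base)
  have hbb : vf.contains b = (pvIter (PySem.Dict.ofList dict) a dict.length).contains b := by
    have h := Iff.trans (Iff.trans (pv_mem_contains vf b) (hiffA b))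
      (Iff.trans (hiffB b).symm (pv_mem_contains _ b).symm)
    cases hb : vf.contains b
    · cases hb2 : (pvIter (PySem.Dict.ofList dict) a dict.length).contains b
      · rfl
      · exact absurd (hb ▸ h.mpr hb2) Bool.false_ne_true
    · exact (h.mp hb).symm
  rw [hA, hB, hca, hcb, hbb]

-- ===== VERDICT (by name: the statement is the Claim_ definition above) =====
theorem find_spec : Claim_equal_find := by
  intro dict a b _ hpre
  unfold Spec_find
  exact pv_main dict a b hpre
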